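-- pv_equiv track=rewrite | github.com/jan25/code_sorted | leetcode/weekly153/max_subarray_sum.py | solve_for_each_idx
-- ===== SOURCE A (Python) =====
-- import heapq
--
-- def solve_for_each_idx(arr, reverse=False):
--     arr = [a for a in arr] # clone
--     if reverse: arr.reverse()
--     vals = []
--     h = []
--     csum = 0
--     for a in arr:
--         csum += a
--         if len(h) > 0:
--             best = max(csum, csum - h[0])
--             vals.append(best)
--         else:
--             vals.append(csum)
--         heapq.heappush(h, csum)
--     if reverse: vals.reverse()
--     return vals
-- ===== SOURCE B (Python) =====
-- def solve_for_each_idx(arr, reverse=False):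
--     xs = arr[::-1] if reverse else list(arr)
--     vals = []
--     csum = 0
--     m = 0  # min(0, minimum prefix sum seen so far)
--     for a in xs:
--         csum += a
--         vals.append(csum - m)
--         if csum < m:
--             m = csum
--     return vals[::-1] if reverse else vals
-- ===== Notes on version B (the rewrite author's own statement) =====
-- stated objective: faster
-- what changed: replaced the heap of all prefix sums (heappush per element, peek at h[0]) by a single running minimum of prefix sums folded into one O(n) pass
import Mathlib
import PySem

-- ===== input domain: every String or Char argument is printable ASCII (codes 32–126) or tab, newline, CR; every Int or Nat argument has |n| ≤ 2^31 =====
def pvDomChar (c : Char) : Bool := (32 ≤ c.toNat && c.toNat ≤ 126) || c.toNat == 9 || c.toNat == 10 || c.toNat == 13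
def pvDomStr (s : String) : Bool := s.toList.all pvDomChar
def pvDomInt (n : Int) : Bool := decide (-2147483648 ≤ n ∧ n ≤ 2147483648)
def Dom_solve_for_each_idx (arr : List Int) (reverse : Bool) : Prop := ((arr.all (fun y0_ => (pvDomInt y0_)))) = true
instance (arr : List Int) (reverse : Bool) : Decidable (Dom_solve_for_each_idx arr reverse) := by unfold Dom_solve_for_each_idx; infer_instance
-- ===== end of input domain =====

-- B replaces A's heap of prefix sums by a running minimum prefix sum: one O(n) pass instead of O(n log n).
-- A mutates only its local clone of arr; the caller's list is untouched, so return-value equivalence is the whole story.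

-- ===== PORT A =====
-- CPython heapq._siftdown, step for step (h[parent] read with getD: every access is in range on heapq's own calls)
def pySiftdown (h : List Int) (item : Int) (pos : Nat) : List Int :=
  if _hp : pos = 0 then h.set 0 item
  else
    if item < h.getD ((pos - 1) / 2) 0 then
      pySiftdown (h.set pos (h.getD ((pos - 1) / 2) 0)) item ((pos - 1) / 2)
    else h.set pos item
termination_by pos
decreasing_by
  have := Nat.div_le_self (pos - 1) 2
  omega

-- CPython heapq.heappush: append then sift the new item up
def pyHeappush (h : List Int) (item : Int) : List Int :=
  pySiftdown (h ++ [item]) item h.length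

-- one iteration of A's for-loop; state = (vals, h, csum)
def stepA (st : List Int × List Int × Int) (a : Int) : List Int × List Int × Int :=
  let vals := st.1
  let h := st.2.1
  let csum := st.2.2 + a
  let vals' := if h.length > 0 then vals ++ [max csum (csum - h.getD 0 0)] else vals ++ [csum]
  (vals', pyHeappush h csum, csum)

def solve_for_each_idx (arr : List Int) (reverse : Bool) : List Int :=
  let arr1 := if reverse then arr.reverse else arr
  let res := arr1.foldl stepA ([], [], 0)
  if reverse then res.1.reverse else res.1

-- ===== PORT B =====
-- one iteration of B's for-loop; state = (vals, csum, m)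
def stepB (st : List Int × Int × Int) (a : Int) : List Int × Int × Int :=
  let vals := st.1
  let csum := st.2.1 + a
  let m := st.2.2
  (vals ++ [csum - m], csum, if csum < m then csum else m)

def solve_for_each_idx_alt (arr : List Int) (reverse : Bool) : List Int :=
  let xs := if reverse then arr.reverse else arr
  let res := xs.foldl stepB ([], 0, 0)
  if reverse then res.1.reverse else res.1

-- ===== PRECONDITION & SPEC =====
def Spec_solve_for_each_idx (arr : List Int) (reverse : Bool) (out : List Int) : Prop := out = solve_for_each_idx_alt arr reverse
instance (arr : List Int) (reverse : Bool) (out : List Int) : Decidable (Spec_solve_for_each_idx arr reverse out) := by unfold Spec_solve_for_each_idx; infer_instance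

-- ===== CLAIM (what is proved, stated in full; the proofs are below) =====
def Claim_equal_solve_for_each_idx : Prop := ∀ (arr : List Int) (reverse : Bool), Dom_solve_for_each_idx arr reverse → Spec_solve_for_each_idx arr reverse (solve_for_each_idx arr reverse)

-- ===== LEMMAS AND PROOFS =====

theorem pySiftdown_length (h : List Int) (item : Int) (pos : Nat) :
    (pySiftdown h item pos).length = h.length := by
  induction pos using Nat.strong_induction_on generalizing h with
  | _ pos ih =>
    unfold pySiftdown
    split
    · simp
    · next hp =>
      split
      · rw [ih ((pos - 1) / 2) (by have := Nat.div_le_self (pos - 1) 2; omega)]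
        simp
      · simp

theorem pySiftdown_mem (h : List Int) (item : Int) (pos : Nat) (hlt : pos < h.length)
    (x : Int) (hx : x ∈ pySiftdown h item pos) : x = item ∨ x ∈ h := by
  induction pos using Nat.strong_induction_on generalizing h with
  | _ pos ih =>
    unfold pySiftdown at hx
    split at hx
    · rcases List.mem_or_eq_of_mem_set hx with h1 | h1
      · exact Or.inr h1
      · exact Or.inl h1
    · next hp =>
      split at hx
      · have hpar : (pos - 1) / 2 < h.length := by
          have := Nat.div_le_self (pos - 1) 2; omega
        rcases ih ((pos - 1) / 2) (by have := Nat.div_le_self (pos - 1) 2; omega)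
            (h.set pos (h.getD ((pos - 1) / 2) 0)) (by simpa using hpar) hx with h1 | h1
        · exact Or.inl h1
        · rcases List.mem_or_eq_of_mem_set h1 with h2 | h2
          · exact Or.inr h2
          · right
            rw [h2, List.getD_eq_getElem _ _ hpar]
            exact List.getElem_mem _
      · rcases List.mem_or_eq_of_mem_set hx with h1 | h1
        · exact Or.inr h1
        · exact Or.inl h1

theorem getD_set_ne (h : List Int) (i j : Nat) (v : Int) (hne : j ≠ i) :
    (h.set i v).getD j 0 = h.getD j 0 := by
  simp [List.getD, List.getElem?_set_ne (by omega : i ≠ j)]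

theorem pySiftdown_head (h : List Int) (item : Int) (pos : Nat) (hlt : pos < h.length)
    (hmin : ∀ i, i < pos → h.getD 0 0 ≤ h.getD i 0) :
    (pySiftdown h item pos).getD 0 0 =
      if pos = 0 then item else if item < h.getD 0 0 then item else h.getD 0 0 := by
  induction pos using Nat.strong_induction_on generalizing h with
  | _ pos ih =>
    unfold pySiftdown
    split
    · next hp =>
      subst hp
      simp [List.getD, List.getElem?_set_self (by omega : 0 < h.length)]
    · next hp =>
      have hpar : (pos - 1) / 2 < pos := by have := Nat.div_le_self (pos - 1) 2; omega
      have hparlen : (pos - 1) / 2 < h.length := lt_trans hpar hlt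
      split
      · next hcmp =>
        by_cases hpz : (pos - 1) / 2 = 0
        · -- parent is the root: item < h[0], so item ends at the root
          rw [ih ((pos - 1) / 2) hpar _ (by simpa using hparlen)
              (by intro i hi; omega)]
          rw [hpz] at hcmp
          rw [if_pos hpz, if_pos hcmp]
        · -- parent ≠ 0: root untouched by the set, recurse
          have hroot : (h.set pos (h.getD ((pos - 1) / 2) 0)).getD 0 0 = h.getD 0 0 :=
            getD_set_ne h pos 0 _ (by omega)
          rw [ih ((pos - 1) / 2) hpar _ (by simpa using hparlen)
              (by
                intro i hi
                rw [getD_set_ne h pos i _ (by omega), hroot]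
                exact hmin i (by omega))]
          rw [if_neg hpz, hroot]
      · next hcmp =>
        -- item ≥ h[parent] ≥ h[0]: stop; the write is at pos ≠ 0
        have h0 : h.getD 0 0 ≤ h.getD ((pos - 1) / 2) 0 := hmin _ hpar
        have hge : ¬ item < h.getD 0 0 := not_lt.mpr (le_trans h0 (not_lt.mp hcmp))
        rw [getD_set_ne h pos 0 item (by omega), if_neg hge]

theorem pyHeappush_length (h : List Int) (item : Int) :
    (pyHeappush h item).length = h.length + 1 := by
  unfold pyHeappush
  rw [pySiftdown_length]
  simp

theorem pyHeappush_mem (h : List Int) (item : Int) (x : Int)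
    (hx : x ∈ pyHeappush h item) : x = item ∨ x ∈ h := by
  unfold pyHeappush at hx
  rcases pySiftdown_mem _ _ _ (by simp) x hx with h1 | h1
  · exact Or.inl h1
  · rcases List.mem_append.mp h1 with h2 | h2
    · exact Or.inr h2
    · exact Or.inl (by simpa using h2)

theorem getD_append_left (h : List Int) (t : List Int) (i : Nat) (hi : i < h.length) :
    (h ++ t).getD i 0 = h.getD i 0 := by
  simp [List.getD, List.getElem?_append_left hi]

theorem pyHeappush_head (h : List Int) (item : Int)
    (hmin : ∀ x ∈ h, h.getD 0 0 ≤ x) :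
    (pyHeappush h item).getD 0 0 =
      if h.length = 0 then item else if item < h.getD 0 0 then item else h.getD 0 0 := by
  unfold pyHeappush
  rw [pySiftdown_head (h ++ [item]) item h.length (by simp)
      (by
        intro i hi
        rcases Nat.eq_zero_or_pos h.length with hz | hz
        · omega
        · rw [getD_append_left h [item] i hi, getD_append_left h [item] 0 hz]
          refine hmin _ ?_
          rw [List.getD_eq_getElem _ _ hi]
          exact List.getElem_mem _)]
  rcases Nat.eq_zero_or_pos h.length with hz | hz
  · simp [hz]
  · rw [getD_append_left h [item] 0 hz]

-- loop invariant tying A's heap to B's running minimum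
def HeapInv (h : List Int) (m : Int) : Prop :=
  (h = [] ∧ m = 0) ∨ (h ≠ [] ∧ (∀ x ∈ h, h.getD 0 0 ≤ x) ∧ m = min 0 (h.getD 0 0))

theorem step_inv (h : List Int) (m c : Int) (hinv : HeapInv h m) :
    HeapInv (pyHeappush h c) (if c < m then c else m) := by
  have hne : pyHeappush h c ≠ [] := by
    have := pyHeappush_length h c
    intro hcon; rw [hcon] at this; simp at this
  rcases hinv with ⟨he, hm⟩ | ⟨hne', hmin, hm⟩
  · subst he hm
    have hhead : (pyHeappush ([] : List Int) c).getD 0 0 = c := by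
      rw [pyHeappush_head [] c (by simp)]; simp
    refine Or.inr ⟨hne, ?_, ?_⟩
    · intro x hx
      rcases pyHeappush_mem _ _ _ hx with h1 | h1
      · rw [hhead, h1]
      · simp at h1
    · rw [hhead]; split <;> omega
  · have hlen : h.length ≠ 0 := by
      intro hz; exact hne' (List.eq_nil_of_length_eq_zero hz)
    have hhead : (pyHeappush h c).getD 0 0 =
        if c < h.getD 0 0 then c else h.getD 0 0 := by
      rw [pyHeappush_head h c hmin, if_neg hlen]
    refine Or.inr ⟨hne, ?_, ?_⟩
    · intro x hx
      rcases pyHeappush_mem _ _ _ hx with h1 | h1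
      · rw [hhead, h1]; split <;> omega
      · have := hmin x h1
        rw [hhead]; split <;> omega
    · rw [hhead]
      have := hm
      split <;> split <;> omega

theorem loop_eq (xs : List Int) : ∀ (vals h : List Int) (csum m : Int),
    HeapInv h m →
    (xs.foldl stepA (vals, h, csum)).1 = (xs.foldl stepB (vals, csum, m)).1 := by
  induction xs with
  | nil => intro vals h csum m _; rfl
  | cons a rest ih =>
    intro vals h csum m hinv
    simp only [List.foldl_cons]
    have hvals : (stepA (vals, h, csum) a).1 = (stepB (vals, csum, m) a).1 := by
      rcases hinv with ⟨he, hm⟩ | ⟨hne, hmin, hm⟩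
      · subst he hm; simp [stepA, stepB]
      · have hlen : h.length > 0 := List.length_pos_of_ne_nil hne
        simp only [stepA, stepB, if_pos hlen]
        have : max (csum + a) (csum + a - h.getD 0 0) = csum + a - m := by
          rw [hm]; omega
        rw [this]
    have hA : stepA (vals, h, csum) a =
        ((stepB (vals, csum, m) a).1, pyHeappush h (csum + a), csum + a) := by
      simp only [stepA] at hvals ⊢
      rw [hvals]
    rw [hA]
    exact ih _ _ _ _ (step_inv h m (csum + a) hinv)

-- ===== VERDICT (by name: the statement is the Claim_ definition above) =====
theorem solve_for_each_idx_spec : Claim_equal_solve_for_each_idx := by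
  intro arr reverse _
  unfold Spec_solve_for_each_idx solve_for_each_idx solve_for_each_idx_alt
  have := loop_eq (if reverse then arr.reverse else arr) [] [] 0 0 (Or.inl ⟨rfl, rfl⟩)
  cases reverse <;> simp only [Bool.false_eq_true, if_false, if_true] at this ⊢ <;> rw [this]
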